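-- pv_equiv track=rewrite | github.com/tanmayagarwal1/Code | Algorithms/ArraysAndDp.py | JoinRopes
-- ===== SOURCE A (Python) =====
-- import heapq
--
-- def JoinRopes(arr):
-- 	if not arr : raise ValueError
-- 	pq = []
-- 	for num in arr : heapq.heappush(pq, num)
-- 	res = 0
-- 	while len(pq) > 1:
-- 		tmp = heapq.heappop(pq) + heapq.heappop(pq)
-- 		res += tmp
-- 		heapq.heappush(pq, tmp)
-- 	return res
-- ===== SOURCE B (Python) =====
-- def JoinRopes(arr):
--     # Two-queue optimal-merge: sort once, then every merged sum is appended to a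
--     # FIFO of sums; the two smallest live at the fronts of the two queues.
--     if not arr:
--         raise ValueError
--     q1 = sorted(arr)
--     q2 = []
--     i = j = 0  # fronts of q1 and q2
--     res = 0
--     remaining = len(q1)
--     while remaining > 1:
--         if i < len(q1) and (j >= len(q2) or q1[i] <= q2[j]):
--             a = q1[i]; i += 1
--         else:
--             a = q2[j]; j += 1
--         if i < len(q1) and (j >= len(q2) or q1[i] <= q2[j]):
--             b = q1[i]; i += 1
--         else:
--             b = q2[j]; j += 1
--         s = a + b
--         res += s
--         q2.append(s)
--         remaining -= 1
--     return res
-- ===== Notes on version B (the rewrite author's own statement) =====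
-- stated objective: alternative
-- what changed: Replaces A's binary min-heap (a heapq push/pop per merge) by the classic two-queue optimal-merge scheme: sort the ropes once, keep merged sums in a FIFO queue that stays in non-decreasing order, and take each minimum from one of the two queue fronts in O(1).
import Mathlib
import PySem

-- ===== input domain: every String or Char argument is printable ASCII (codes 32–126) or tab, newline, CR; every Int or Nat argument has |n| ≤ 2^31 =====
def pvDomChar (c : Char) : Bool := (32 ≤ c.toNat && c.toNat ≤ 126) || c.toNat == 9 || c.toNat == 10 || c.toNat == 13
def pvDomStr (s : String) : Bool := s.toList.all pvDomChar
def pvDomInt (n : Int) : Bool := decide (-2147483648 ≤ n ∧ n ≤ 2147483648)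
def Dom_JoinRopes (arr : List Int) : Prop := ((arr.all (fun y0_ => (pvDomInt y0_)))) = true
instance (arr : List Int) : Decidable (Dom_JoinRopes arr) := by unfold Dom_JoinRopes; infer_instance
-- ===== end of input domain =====

-- B replaces A's binary heap by the classic two-queue optimal-merge scheme: sort once, keep the
-- merged sums in a FIFO queue, and take each minimum from one of the two queue fronts.

-- ===== PORT A =====
-- heapq is a binary min-heap of Ints; the only thing A observes about it is the value each
-- heappop returns, and heappop always returns the current minimum of the heap's multiset.
-- We model the heap state by the sorted list of its elements: heappush is sorted insertion,
-- heappop takes the head. This is exact for A's result (ties are equal Int values).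
def heappush (pq : List Int) (x : Int) : List Int := List.orderedInsert (· ≤ ·) x pq

-- the 'while len(pq) > 1' loop: pop the two minima, re-push their sum, accumulate res
def loopA : List Int → Int → Int
  | a :: b :: rest, res => loopA (heappush rest (a + b)) (res + (a + b))
  | _, res => res
termination_by pq _ => pq.length
decreasing_by simp [heappush, List.orderedInsert_length]

def JoinRopes (arr : List Int) : Int := loopA (arr.foldl heappush []) 0

-- ===== PORT B =====
-- one pop of Source B's loop: take the smaller front of the sorted queue q1 / the FIFO of sums q2
def popMin : List Int → List Int → Int × List Int × List Int
  | x :: q1, [] => (x, q1, [])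
  | x :: q1, y :: q2 => if x ≤ y then (x, q1, y :: q2) else (y, x :: q1, q2)
  | [], y :: q2 => (y, [], q2)
  | [], [] => (0, [], [])   -- unreachable: the loop guard keeps at least two elements around

theorem popMin_length (q1 q2 : List Int) (h : q1.length + q2.length ≠ 0) :
    (popMin q1 q2).2.1.length + (popMin q1 q2).2.2.length + 1 = q1.length + q2.length := by
  match q1, q2 with
  | x :: q1, [] => simp [popMin]
  | x :: q1, y :: q2 => simp only [popMin]; split <;> simp <;> omega
  | [], y :: q2 => simp [popMin]
  | [], [] => simp at h

-- Source B's 'while remaining > 1' loop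
def loopB (q1 q2 : List Int) (res : Int) : Int :=
  if _h : q1.length + q2.length ≤ 1 then res
  else
    let p := popMin q1 q2
    let p' := popMin p.2.1 p.2.2
    let s := p.1 + p'.1
    loopB p'.2.1 (p'.2.2 ++ [s]) (res + s)
termination_by q1.length + q2.length
decreasing_by
  have h1 := popMin_length q1 q2 (by omega)
  have h2 := popMin_length (popMin q1 q2).2.1 (popMin q1 q2).2.2 (by omega)
  simp only [List.length_append, List.length_cons, List.length_nil]
  omega

def JoinRopes_alt (arr : List Int) : Int :=
  loopB (PySem.List.sorted arr (fun x => x) false) [] 0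

-- ===== PRECONDITION & SPEC =====
-- A raises ValueError on the empty list (and B does too); Pre_ excludes exactly that input.
def Pre_JoinRopes (arr : List Int) : Prop := arr ≠ []
instance (arr : List Int) : Decidable (Pre_JoinRopes arr) := by unfold Pre_JoinRopes; infer_instance
def pvWitness_JoinRopes : List Int := ([8, 4, 6, 12])

def Spec_JoinRopes (arr : List Int) (out : Int) : Prop := out = JoinRopes_alt arr
instance (arr : List Int) (out : Int) : Decidable (Spec_JoinRopes arr out) := by unfold Spec_JoinRopes; infer_instance

-- ===== CLAIM (what is proved, stated in full; the proofs are below) =====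
def Claim_equal_JoinRopes : Prop := ∀ (arr : List Int), Dom_JoinRopes arr → Pre_JoinRopes arr → Spec_JoinRopes arr (JoinRopes arr)

-- ===== LEMMAS AND PROOFS =====

-- shorthand for "sorted(l)" with the identity key
def sortId (l : List Int) : List Int := PySem.List.sorted l (fun x => x) false

-- the two-queue invariant: every sum z sitting in q2 is at most x + y for ANY two elements
-- x, y of the remaining pool other than (one occurrence of) z itself
def InvC (q1 q2 : List Int) : Prop :=
  ∀ z ∈ q2, ∀ x y : Int, x ::ₘ {y} ≤ ((q1 ++ q2 : List Int) : Multiset Int).erase z → z ≤ x + y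

theorem loopA_small (l : List Int) (res : Int) (h : l.length ≤ 1) : loopA l res = res := by
  match l with
  | [] => simp [loopA]
  | [x] => simp [loopA]
  | a :: b :: t => simp at h

theorem popMin_perm (q1 q2 : List Int) (h : q1.length + q2.length ≠ 0) :
    (q1 ++ q2).Perm ((popMin q1 q2).1 :: ((popMin q1 q2).2.1 ++ (popMin q1 q2).2.2)) := by
  match q1, q2 with
  | x :: q1, [] => simp [popMin]
  | x :: q1, y :: q2 =>
      simp only [popMin]; split
      · simp
      · exact List.perm_middle
  | [], y :: q2 => simp [popMin]
  | [], [] => simp at h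

theorem popMin_min (q1 q2 : List Int) (h1 : List.Pairwise (· ≤ ·) q1) (h2 : List.Pairwise (· ≤ ·) q2) :
    ∀ w ∈ (popMin q1 q2).2.1 ++ (popMin q1 q2).2.2, (popMin q1 q2).1 ≤ w := by
  match q1, q2 with
  | [], [] => simp [popMin]
  | [], y :: q2 =>
      intro w hw; simp [popMin] at hw ⊢
      exact List.rel_of_pairwise_cons h2 hw
  | x :: q1, [] =>
      intro w hw; simp [popMin] at hw ⊢
      exact List.rel_of_pairwise_cons h1 hw
  | x :: q1, y :: q2 =>
      intro w hw
      have hx1 : ∀ u ∈ q1, x ≤ u := fun u hu => List.rel_of_pairwise_cons h1 hu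
      have hy2 : ∀ u ∈ q2, y ≤ u := fun u hu => List.rel_of_pairwise_cons h2 hu
      rcases le_or_gt x y with hxy | hxy
      · simp only [popMin, if_pos hxy, List.mem_append, List.mem_cons] at hw ⊢
        rcases hw with hw | hw | hw
        · exact hx1 w hw
        · exact hw ▸ hxy
        · exact le_trans hxy (hy2 w hw)
      · simp only [popMin, if_neg (not_le_of_gt hxy), List.mem_append, List.mem_cons] at hw ⊢
        rcases hw with (hw | hw) | hw
        · exact hw ▸ le_of_lt hxy
        · exact le_trans (le_of_lt hxy) (hx1 w hw)
        · exact hy2 w hw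

theorem popMin_sorted (q1 q2 : List Int) (h1 : List.Pairwise (· ≤ ·) q1) (h2 : List.Pairwise (· ≤ ·) q2) :
    List.Pairwise (· ≤ ·) (popMin q1 q2).2.1 ∧ List.Pairwise (· ≤ ·) (popMin q1 q2).2.2 := by
  match q1, q2 with
  | [], [] => simp [popMin]
  | [], y :: q2 => simpa [popMin] using h2.sublist (List.sublist_cons_self y q2)
  | x :: q1, [] => simpa [popMin] using h1.sublist (List.sublist_cons_self x q1)
  | x :: q1, y :: q2 =>
      rcases le_or_gt x y with hxy | hxy
      · simp only [popMin, if_pos hxy]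
        exact ⟨h1.sublist (List.sublist_cons_self x q1), h2⟩
      · simp only [popMin, if_neg (not_le_of_gt hxy)]
        exact ⟨h1, h2.sublist (List.sublist_cons_self y q2)⟩

theorem popMin_sub2 (q1 q2 : List Int) : ∀ z ∈ (popMin q1 q2).2.2, z ∈ q2 := by
  match q1, q2 with
  | [], [] => simp [popMin]
  | [], y :: q2 => intro z hz; simp [popMin] at hz ⊢; tauto
  | x :: q1, [] => simp [popMin]
  | x :: q1, y :: q2 =>
      intro z hz
      rcases le_or_gt x y with hxy | hxy
      · simp only [popMin, if_pos hxy] at hz; simp at hz ⊢; tauto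
      · simp only [popMin, if_neg (not_le_of_gt hxy)] at hz; simp at hz ⊢; tauto


theorem pair_mem_left {x y : Int} {M : Multiset Int} (h : x ::ₘ {y} ≤ M) : x ∈ M :=
  Multiset.mem_of_le h (Multiset.mem_cons_self x {y})

theorem pair_mem_right {x y : Int} {M : Multiset Int} (h : x ::ₘ {y} ≤ M) : y ∈ M.erase x := by
  have := Multiset.erase_le_erase x h
  simpa using this

theorem pair_le_of_mem {x y : Int} {M : Multiset Int} (hx : x ∈ M) (hy : y ∈ M.erase x) :
    x ::ₘ {y} ≤ M := by
  have h2 : ({y} : Multiset Int) ≤ M.erase x := by simpa using hy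
  exact (Multiset.cons_le_cons x h2).trans (le_of_eq (Multiset.cons_erase hx))

theorem sortId_cons_cons {pool rest : List Int} {a b : Int}
    (hperm : pool.Perm (a :: b :: rest)) (hab : a ≤ b) (hb : ∀ w ∈ rest, b ≤ w) :
    sortId pool = a :: b :: sortId rest := by
  unfold sortId
  apply PySem.List.sorted_id_eq_of_perm_of_pairwise
  · exact (((PySem.List.sorted_perm rest _ false).cons b).cons a).trans hperm.symm
  · refine List.Pairwise.cons ?_ (List.Pairwise.cons ?_ ?_)
    · intro w hw
      rcases List.mem_cons.mp hw with rfl | hw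
      · exact hab
      · exact le_trans hab (hb w ((PySem.List.mem_sorted rest _ false w).mp hw))
    · intro w hw
      exact hb w ((PySem.List.mem_sorted rest _ false w).mp hw)
    · simpa using PySem.List.sorted_pairwise rest (fun x => x)

theorem sortId_append_singleton (l : List Int) (s : Int) :
    sortId (l ++ [s]) = heappush (sortId l) s := by
  unfold sortId heappush
  apply PySem.List.sorted_id_eq_of_perm_of_pairwise
  · exact (List.perm_orderedInsert _ s _).trans
      (((PySem.List.sorted_perm l _ false).cons s).trans (List.perm_append_singleton s l).symm)
  · exact List.Pairwise.orderedInsert s _ (by simpa using PySem.List.sorted_pairwise l (fun x => x))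

theorem loopA_cons (a b : Int) (t : List Int) (res : Int) :
    loopA (a :: b :: t) res = loopA (heappush t (a + b)) (res + (a + b)) := by
  rw [loopA]

theorem loopB_small (q1 q2 : List Int) (res : Int) (h : q1.length + q2.length ≤ 1) :
    loopB q1 q2 res = res := by
  rw [loopB]; simp [h]

theorem loopB_step {q1 q2 q1a q2a q1b q2b : List Int} {a b : Int} (res : Int)
    (h : ¬ q1.length + q2.length ≤ 1)
    (hp1 : popMin q1 q2 = (a, q1a, q2a)) (hp2 : popMin q1a q2a = (b, q1b, q2b)) :
    loopB q1 q2 res = loopB q1b (q2b ++ [a + b]) (res + (a + b)) := by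
  rw [loopB]; simp [h, hp1, hp2]

theorem mem_q2_le_sum {q1 q2 q1b q2b : List Int} {a b : Int}
    (hC : InvC q1 q2)
    (hperm : ((q1 ++ q2 : List Int) : Multiset Int) = a ::ₘ b ::ₘ ((q1b ++ q2b : List Int) : Multiset Int))
    {z : Int} (hz2 : z ∈ q2) (hzM : z ∈ q1b ++ q2b) : z ≤ a + b := by
  apply hC z hz2 a b
  have hzM' : z ∈ ((q1b ++ q2b : List Int) : Multiset Int) := by simpa using hzM
  rw [hperm]
  have heq : (a ::ₘ b ::ₘ ((q1b ++ q2b : List Int) : Multiset Int))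
      = z ::ₘ a ::ₘ b ::ₘ (((q1b ++ q2b : List Int) : Multiset Int).erase z) := by
    conv_lhs => rw [← Multiset.cons_erase hzM']
    rw [Multiset.cons_swap b z, Multiset.cons_swap a z]
  rw [heq, Multiset.erase_cons_head]
  exact Multiset.cons_le_cons a (Multiset.cons_le_cons b (Multiset.zero_le _))

theorem invC_step {q1 q2 q1b q2b : List Int} {a b : Int}
    (hC : InvC q1 q2)
    (hperm : ((q1 ++ q2 : List Int) : Multiset Int) = a ::ₘ b ::ₘ ((q1b ++ q2b : List Int) : Multiset Int))
    (hab : a ≤ b)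
    (hbmin : ∀ w ∈ q1b ++ q2b, b ≤ w)
    (hmem2 : ∀ z ∈ q2b, z ∈ q2) :
    InvC q1b (q2b ++ [a + b]) := by
  intro z hz x y hxy
  have hpool : ((q1b ++ (q2b ++ [a + b]) : List Int) : Multiset Int)
      = ((q1b ++ q2b : List Int) : Multiset Int) + {a + b} := by
    rw [← List.append_assoc]
    rw [← Multiset.coe_add]
    simp
  rw [hpool] at hxy
  rcases List.mem_append.mp hz with hz2b | hzs
  · -- z is an old element of q2
    have hzM : z ∈ ((q1b ++ q2b : List Int) : Multiset Int) := by
      simpa using List.mem_append_right q1b hz2b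
    rw [Multiset.erase_add_left_pos _ hzM, add_comm, Multiset.singleton_add] at hxy
    have hz_le : z ≤ a + b :=
      mem_q2_le_sum hC hperm (hmem2 z hz2b) (List.mem_append_right q1b hz2b)
    have hbz : b ≤ z := hbmin z (List.mem_append_right q1b hz2b)
    have hMer : ∀ w ∈ (((q1b ++ q2b : List Int) : Multiset Int)).erase z, b ≤ w := by
      intro w hw
      exact hbmin w (by simpa using Multiset.mem_of_le (Multiset.erase_le z _) hw)
    have hx := pair_mem_left hxy
    have hy := pair_mem_right hxy
    by_cases hxs : x = a + b
    · subst hxs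
      rw [Multiset.erase_cons_head] at hy
      have hby := hMer y hy
      omega
    · have hxM : x ∈ (((q1b ++ q2b : List Int) : Multiset Int)).erase z := by
        rcases Multiset.mem_cons.mp hx with h | h
        · exact absurd h hxs
        · exact h
      rw [Multiset.erase_cons_tail _ (fun h => hxs h.symm)] at hy
      rcases Multiset.mem_cons.mp hy with hys | hyM
      · have hbx := hMer x hxM
        omega
      · -- both x and y were already in the pool: use the old invariant
        apply hC z (hmem2 z hz2b) x y
        rw [hperm]
        have heq : (a ::ₘ b ::ₘ ((q1b ++ q2b : List Int) : Multiset Int)).erase z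
            = a ::ₘ b ::ₘ ((((q1b ++ q2b : List Int) : Multiset Int)).erase z) := by
          conv_lhs => rw [← Multiset.cons_erase hzM]
          rw [Multiset.cons_swap b z, Multiset.cons_swap a z, Multiset.erase_cons_head]
        rw [heq]
        exact (pair_le_of_mem hxM hyM).trans
          ((Multiset.le_cons_self _ b).trans (Multiset.le_cons_self _ a))
  · -- z is the sum just appended
    have hzs' : z = a + b := by simpa using hzs
    subst hzs'
    rw [Multiset.erase_add_right_pos _ (Multiset.mem_singleton_self _),
      Multiset.erase_singleton, add_zero] at hxy
    have hbx : b ≤ x := by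
      have := pair_mem_left hxy
      exact hbmin x (by simpa using this)
    have hby : b ≤ y := by
      have := Multiset.mem_of_le (Multiset.erase_le x _) (pair_mem_right hxy)
      exact hbmin y (by simpa using this)
    omega

theorem loopB_eq (n : Nat) : ∀ (q1 q2 : List Int) (res : Int),
    q1.length + q2.length ≤ n →
    List.Pairwise (· ≤ ·) q1 → List.Pairwise (· ≤ ·) q2 → InvC q1 q2 →
    loopB q1 q2 res = loopA (sortId (q1 ++ q2)) res := by
  induction n with
  | zero =>
    intro q1 q2 res hlen _ _ _
    rw [loopB_small q1 q2 res (by omega), loopA_small]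
    simp [sortId, PySem.List.length_sorted]
    omega
  | succ n ih =>
    intro q1 q2 res hlen hs1 hs2 hC
    by_cases hsmall : q1.length + q2.length ≤ 1
    · rw [loopB_small q1 q2 res hsmall, loopA_small]
      simp [sortId, PySem.List.length_sorted]
      omega
    · have e1 := popMin_perm q1 q2 (by omega)
      have m1 := popMin_min q1 q2 hs1 hs2
      have s1 := popMin_sorted q1 q2 hs1 hs2
      have sub1 := popMin_sub2 q1 q2
      have l1 := popMin_length q1 q2 (by omega)
      rcases hp1 : popMin q1 q2 with ⟨a, q1a, q2a⟩
      rw [hp1] at e1 m1 s1 sub1 l1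
      simp only at e1 m1 s1 sub1 l1
      have e2 := popMin_perm q1a q2a (by omega)
      have m2 := popMin_min q1a q2a s1.1 s1.2
      have s2 := popMin_sorted q1a q2a s1.1 s1.2
      have sub2 := popMin_sub2 q1a q2a
      have l2 := popMin_length q1a q2a (by omega)
      rcases hp2 : popMin q1a q2a with ⟨b, q1b, q2b⟩
      rw [hp2] at e2 m2 s2 sub2 l2
      simp only at e2 m2 s2 sub2 l2
      have hab : a ≤ b := m1 b (e2.mem_iff.mpr List.mem_cons_self)
      have hpermL : (q1 ++ q2).Perm (a :: b :: (q1b ++ q2b)) := e1.trans (e2.cons a)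
      have hperm : ((q1 ++ q2 : List Int) : Multiset Int)
          = a ::ₘ b ::ₘ ((q1b ++ q2b : List Int) : Multiset Int) := by
        have := Multiset.coe_eq_coe.mpr hpermL
        simpa using this
      have hmem2 : ∀ z ∈ q2b, z ∈ q2 := fun z hz => sub1 z (sub2 z hz)
      have hq2s : List.Pairwise (· ≤ ·) (q2b ++ [a + b]) := by
        rw [List.pairwise_append]
        refine ⟨s2.2, List.pairwise_singleton _ _, ?_⟩
        intro z hz w hw
        rcases List.mem_singleton.mp hw with rfl
        exact mem_q2_le_sum hC hperm (hmem2 z hz) (List.mem_append_right q1b hz)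
      have hCnew : InvC q1b (q2b ++ [a + b]) := invC_step hC hperm hab m2 hmem2
      rw [loopB_step res hsmall hp1 hp2]
      rw [ih q1b (q2b ++ [a + b]) (res + (a + b)) (by simp; omega) s2.1 hq2s hCnew]
      rw [sortId_cons_cons hpermL hab m2, loopA_cons]
      rw [← List.append_assoc, sortId_append_singleton]

theorem foldl_heappush_perm (l : List Int) : ∀ acc : List Int,
    (l.foldl heappush acc).Perm (acc ++ l) := by
  induction l with
  | nil => intro acc; simp
  | cons x l ih =>
    intro acc
    simp only [List.foldl_cons]
    exact (ih (heappush acc x)).trans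
      ((((List.perm_orderedInsert _ x acc)).append_right l).trans List.perm_middle.symm)

theorem foldl_heappush_pairwise (l : List Int) : ∀ acc : List Int,
    List.Pairwise (· ≤ ·) acc → List.Pairwise (· ≤ ·) (l.foldl heappush acc) := by
  induction l with
  | nil => intro acc h; simpa using h
  | cons x l ih =>
    intro acc h
    simp only [List.foldl_cons]
    exact ih (heappush acc x) (List.Pairwise.orderedInsert x acc h)

-- ===== VERDICT (by name: the statement is the Claim_ definition above) =====
theorem JoinRopes_spec : Claim_equal_JoinRopes := by
  intro arr _ _
  unfold Spec_JoinRopes JoinRopes JoinRopes_alt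
  have hsorted : List.Pairwise (· ≤ ·) (sortId arr) := by
    simpa [sortId] using PySem.List.sorted_pairwise arr (fun x => x)
  have hfold : arr.foldl heappush [] = sortId arr := by
    symm; unfold sortId
    apply PySem.List.sorted_id_eq_of_perm_of_pairwise
    · simpa using foldl_heappush_perm arr []
    · exact foldl_heappush_pairwise arr [] (by simp)
  have hmain := loopB_eq ((sortId arr).length) (sortId arr) [] 0 (by simp) hsorted (by simp)
    (fun z hz => absurd hz List.not_mem_nil)
  rw [hfold]
  show loopA (sortId arr) 0 = loopB (sortId arr) [] 0
  rw [hmain, List.append_nil]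
  unfold sortId
  rw [PySem.List.sorted_sorted]
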